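-- pv_equiv track=rewrite | github.com/panchakarlabk/ansible_playbook_roles | playbooks/filtered_nodes.py | filter_nodes
-- ===== SOURCE A (Python) =====
-- def filter_nodes(nodes, ignore_conditions):
--     """
--     Filters out nodes that match any condition in ignore_conditions.
--     Supports:
--     - Forward wildcards (e.g., "Database*")
--     - Backward wildcards (e.g., "*Database")
--     - Bidirectional wildcards (e.g., "*Database*")
--     - Exact matches
--     - Case-insensitive matching
--
--     :param nodes: List of nodes (dictionaries) to filter.
--     :param ignore_conditions: List of dictionaries with key-value pairs to match.
--     :return: Filtered list of nodes.
--     """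
--     def matches_condition(node, condition):
--         for key, value in condition.items():
--             # Check if the node contains the key
--             if key in node:
--                 node_value = str(node[key]).lower()  # Convert node value to lowercase
--                 condition_value = str(value).lower()  # Convert condition value to lowercase
--
--                 # Handle prefix-based matching (e.g., "Database*")
--                 if condition_value.endswith('*') and not condition_value.startswith('*'):
--                     prefix = condition_value[:-1]  # Remove the '*' for prefix matching
--                     if node_value.startswith(prefix):
--                         return True
--
--                 # Handle suffix-based matching (e.g., "*Database")
--                 if condition_value.startswith('*') and not condition_value.endswith('*'):
--                     suffix = condition_value[1:]  # Remove the '*' for suffix matching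
--                     if node_value.endswith(suffix):
--                         return True
--
--                 # Handle bidirectional matching (e.g., "*Database*")
--                 if condition_value.startswith('*') and condition_value.endswith('*'):
--                     substring = condition_value[1:-1]  # Remove '*' from both ends
--                     if substring in node_value:
--                         return True
--
--                 # Handle exact matches
--                 if condition_value == node_value:
--                     return True
--
--         return False
--
--     # Filter out nodes that match any condition in ignore_conditions
--     filtered_nodes = [
--         node for node in nodes
--         if not any(matches_condition(node, condition) for condition in ignore_conditions)
--     ]
--
--     return filtered_nodes
-- ===== SOURCE B (Python) =====
-- def filter_nodes(nodes, ignore_conditions):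
--     by_key = {}
--     for condition in ignore_conditions:
--         for key, value in condition.items():
--             v = str(value).lower()
--             if v.startswith('*') and v.endswith('*'):
--                 spec = ('in', v[1:-1])
--             elif v.endswith('*'):
--                 spec = ('pre', v[:-1])
--             elif v.startswith('*'):
--                 spec = ('suf', v[1:])
--             else:
--                 spec = ('eq', v)
--             by_key.setdefault(key, []).append(spec)
--
--     def keep(node):
--         for key, val in node.items():
--             specs = by_key.get(key)
--             if specs is None:
--                 continue
--             nv = str(val).lower()
--             for mode, pat in specs:
--                 if (mode == 'eq' and nv == pat) or \
--                    (mode == 'pre' and nv.startswith(pat)) or \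
--                    (mode == 'suf' and nv.endswith(pat)) or \
--                    (mode == 'in' and pat in nv):
--                     return False
--         return True
--
--     return [node for node in nodes if keep(node)]
-- ===== Notes on version B (the rewrite author's own statement) =====
-- stated objective: alternative
-- what changed: B compiles ignore_conditions once into a dict mapping each condition key to its (mode, pattern) matchers (the exact test A always runs is subsumed by each wildcard mode, so one mode per entry), then tests each node by scanning only the node's own entries against that index; it trades A's lazy per-node re-analysis of every condition entry for an up-front index, which pays off when conditions rarely match but not on match-heavy inputs.
import Mathlib
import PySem

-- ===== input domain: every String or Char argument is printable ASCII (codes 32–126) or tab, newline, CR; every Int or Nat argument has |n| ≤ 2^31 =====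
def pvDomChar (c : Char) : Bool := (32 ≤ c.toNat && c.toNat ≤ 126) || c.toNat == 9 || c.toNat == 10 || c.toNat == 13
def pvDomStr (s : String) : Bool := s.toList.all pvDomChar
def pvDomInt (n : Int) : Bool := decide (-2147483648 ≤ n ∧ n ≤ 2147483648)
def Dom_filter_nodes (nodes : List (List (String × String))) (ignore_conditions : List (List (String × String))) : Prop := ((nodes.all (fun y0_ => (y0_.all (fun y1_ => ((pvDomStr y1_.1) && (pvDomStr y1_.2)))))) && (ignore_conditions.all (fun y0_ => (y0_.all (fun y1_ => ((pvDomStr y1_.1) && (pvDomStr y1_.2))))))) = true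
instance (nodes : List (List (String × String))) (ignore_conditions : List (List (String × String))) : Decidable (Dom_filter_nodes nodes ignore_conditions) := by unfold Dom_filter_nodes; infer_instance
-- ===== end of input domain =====

-- B indexes the compiled (mode, pattern) matchers by condition key once and then scans each
-- node's own entries against that index, instead of re-analysing every condition entry per node.


-- ===== PORT A =====
-- matches_condition: the for-loop over condition.items() with early 'return True' is the
-- disjunction over the items, each item tested by the four non-elif branches in order.
def pvAMatchItem (node : List (String × String)) (key value : String) : Bool :=
  match PySem.Dict.get? (PySem.Dict.mk node) key with          -- 'if key in node' + node[key]
  | none => false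
  | some nv0 =>
    let node_value := PySem.Str.lower nv0
    let condition_value := PySem.Str.lower value
    (if PySem.Str.endswith condition_value "*" && !(PySem.Str.startswith condition_value "*") then
       PySem.Str.startswith node_value (PySem.Str.slice condition_value none (some (-1)))
     else false) ||
    (if PySem.Str.startswith condition_value "*" && !(PySem.Str.endswith condition_value "*") then
       PySem.Str.endswith node_value (PySem.Str.slice condition_value (some 1) none)
     else false) ||
    (if PySem.Str.startswith condition_value "*" && PySem.Str.endswith condition_value "*" then
       PySem.Str.isIn (PySem.Str.slice condition_value (some 1) (some (-1))) node_value
     else false) ||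
    (condition_value == node_value)

def pvAMatchesCondition (node : List (String × String)) (condition : List (String × String)) : Bool :=
  condition.any (fun kv => pvAMatchItem node kv.1 kv.2)

def filter_nodes (nodes : List (List (String × String))) (ignore_conditions : List (List (String × String))) : List (List (String × String)) :=
  nodes.filter (fun node => !(ignore_conditions.any (fun condition => pvAMatchesCondition node condition)))

-- ===== PORT B =====
-- one compiled matcher per condition entry: (mode, pattern)
def pvSpecOf (value : String) : String × String :=
  let v := PySem.Str.lower value
  if PySem.Str.startswith v "*" && PySem.Str.endswith v "*" then
    ("in", PySem.Str.slice v (some 1) (some (-1)))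
  else if PySem.Str.endswith v "*" then
    ("pre", PySem.Str.slice v none (some (-1)))
  else if PySem.Str.startswith v "*" then
    ("suf", PySem.Str.slice v (some 1) none)
  else
    ("eq", v)

-- by_key.setdefault(key, []).append(spec) = d[key] = d.get(key, []) + [spec]
def pvByKey (ignore_conditions : List (List (String × String))) : PySem.Dict String (List (String × String)) :=
  ignore_conditions.foldl
    (fun d condition => condition.foldl
      (fun d kv => d.modify kv.1 [] (fun l => l ++ [pvSpecOf kv.2])) d)
    PySem.Dict.empty

-- the mode dispatch of Source B's inner loop
def pvTest (nv : String) (spec : String × String) : Bool :=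
  (spec.1 == "eq" && (nv == spec.2)) ||
  (spec.1 == "pre" && PySem.Str.startswith nv spec.2) ||
  (spec.1 == "suf" && PySem.Str.endswith nv spec.2) ||
  (spec.1 == "in" && PySem.Str.isIn spec.2 nv)

-- keep(node): loop over node.items() with early 'return False'
def pvKeep (byKey : PySem.Dict String (List (String × String))) (node : List (String × String)) : Bool :=
  !(node.any (fun kv =>
    match byKey.get? kv.1 with
    | none => false
    | some specs => specs.any (pvTest (PySem.Str.lower kv.2))))

def filter_nodes_alt (nodes : List (List (String × String))) (ignore_conditions : List (List (String × String))) : List (List (String × String)) :=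
  let byKey := pvByKey ignore_conditions
  nodes.filter (pvKeep byKey)

-- ===== PRECONDITION & SPEC =====
-- Pre_ excludes inputs whose node association lists carry duplicate keys: such lists do not
-- arise from a Python dict (node is a dict in A), so their dict reading is ambiguous.
def Pre_filter_nodes (nodes : List (List (String × String))) (ignore_conditions : List (List (String × String))) : Prop :=
  ∀ node ∈ nodes, (node.map Prod.fst).Nodup
instance (nodes : List (List (String × String))) (ignore_conditions : List (List (String × String))) : Decidable (Pre_filter_nodes nodes ignore_conditions) := by unfold Pre_filter_nodes; infer_instance

def pvWitness_filter_nodes : (List (List (String × String))) × (List (List (String × String))) :=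
  ([[("name", "db1"), ("role", "Web")], [("name", "app7")]], [[("name", "db*")], [("role", "*EB")]])

def Spec_filter_nodes (nodes : List (List (String × String))) (ignore_conditions : List (List (String × String))) (out : List (List (String × String))) : Prop := out = filter_nodes_alt nodes ignore_conditions
instance (nodes : List (List (String × String))) (ignore_conditions : List (List (String × String))) (out : List (List (String × String))) : Decidable (Spec_filter_nodes nodes ignore_conditions out) := by unfold Spec_filter_nodes; infer_instance

-- ===== CLAIM (what is proved, stated in full; the proofs are below) =====
def Claim_equal_filter_nodes : Prop := ∀ (nodes : List (List (String × String))) (ignore_conditions : List (List (String × String))), Dom_filter_nodes nodes ignore_conditions → Pre_filter_nodes nodes ignore_conditions → Spec_filter_nodes nodes ignore_conditions (filter_nodes nodes ignore_conditions)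

-- ===== LEMMAS AND PROOFS =====

-- xs[1:-1] is tail-then-dropLast
theorem pv_slice_one_neg_one {α : Type} (xs : List α) :
    PySem.List.slice xs (some 1) (some (-1)) = xs.tail.dropLast := by
  cases xs with
  | nil => rfl
  | cons a t =>
    simp only [PySem.List.slice, Int.reduceNeg, Order.lt_one_iff, PySem.List.clampIdx_neg_ofNat,
      zero_le_one, PySem.List.clampIdx_of_nonneg, Int.toNat_one]
    simp [List.dropLast_eq_take]

theorem pv_tail_dropLast_infix {α : Type} (l : List α) : l.tail.dropLast <:+: l :=
  (List.dropLast_prefix l.tail).isInfix.trans (List.tail_suffix l).isInfix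

-- the heart, part 1: A's four-branch test on one condition entry equals B's compiled
-- single-mode test (A's always-run exact test is subsumed by each wildcard mode)
theorem pv_item_eq (node : List (String × String)) (key value : String) :
    pvAMatchItem node key value
      = (match PySem.Dict.get? (PySem.Dict.mk node) key with
         | none => false
         | some nv0 => pvTest (PySem.Str.lower nv0) (pvSpecOf value)) := by
  unfold pvAMatchItem pvTest pvSpecOf
  cases hsw : PySem.Str.startswith (PySem.Str.lower value) "*" <;>
  cases hew : PySem.Str.endswith (PySem.Str.lower value) "*" <;>
    simp only [hsw, hew] <;> simp <;>
    cases hget : PySem.Dict.get? (PySem.Dict.mk node) key <;> simp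
  case false.false.some nv0 =>
    exact eq_comm
  case false.true.some nv0 =>
    -- prefix mode; the exact test is subsumed: cv == nv → nv startswith cv[:-1]
    intro hv
    have hv' : PySem.Chars.lower value.toList = PySem.Chars.lower nv0.toList := by
      rw [← PySem.Str.toList_lower, ← PySem.Str.toList_lower, hv]
    rw [← hv', PySem.Chars.startswith_iff, PySem.List.slice_to_neg_one]
    exact List.dropLast_prefix _
  case true.false.some nv0 =>
    -- suffix mode; the exact test is subsumed: cv == nv → nv endswith cv[1:]
    intro hv
    have hv' : PySem.Chars.lower value.toList = PySem.Chars.lower nv0.toList := by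
      rw [← PySem.Str.toList_lower, ← PySem.Str.toList_lower, hv]
    rw [← hv', PySem.Chars.endswith_iff, PySem.List.slice_from_one]
    exact List.tail_suffix _
  case true.true.some nv0 =>
    -- substring mode; the exact test is subsumed: cv == nv → cv[1:-1] in nv
    intro hv
    have hv' : PySem.Chars.lower value.toList = PySem.Chars.lower nv0.toList := by
      rw [← PySem.Str.toList_lower, ← PySem.Str.toList_lower, hv]
    rw [← hv', PySem.Chars.isIn_iff_infix, pv_slice_one_neg_one]
    exact pv_tail_dropLast_infix _

-- the grouping invariant of Source B's setdefault/append loop, as one flat fold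
theorem pv_byKey_flat (flat : List (String × String))
    (d : PySem.Dict String (List (String × String))) (k : String) :
    (flat.foldl (fun d kv => d.modify kv.1 [] (fun l => l ++ [pvSpecOf kv.2])) d).getD k []
      = d.getD k [] ++ ((flat.filter (fun kv => kv.1 == k)).map (fun kv => pvSpecOf kv.2)) := by
  induction flat generalizing d with
  | nil => simp
  | cons kv t ih =>
    simp only [List.foldl_cons, ih, List.filter_cons]
    rw [PySem.Dict.getD_modify]
    by_cases hk : k = kv.1
    · subst hk; simp
    · have : (kv.1 == k) = false := by simpa using fun h => hk h.symm
      simp [hk, this]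

theorem pv_byKey_getD (ics : List (List (String × String))) (k : String) :
    (pvByKey ics).getD k []
      = (((ics.flatMap id).filter (fun kv => kv.1 == k)).map (fun kv => pvSpecOf kv.2)) := by
  unfold pvByKey
  rw [← List.foldl_flatMap, pv_byKey_flat]
  simp

-- the heart, part 2: scanning every condition entry against the node equals scanning the
-- node's entries against the key-indexed matchers (needs distinct keys in the node)
theorem pv_exchange (node : List (String × String)) (flat : List (String × String))
    (h : (node.map Prod.fst).Nodup) :
    (flat.any (fun s =>
      match PySem.Dict.get? (PySem.Dict.mk node) s.1 with
      | none => false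
      | some nv0 => pvTest (PySem.Str.lower nv0) (pvSpecOf s.2)))
    = (node.any (fun kv =>
        ((flat.filter (fun s => s.1 == kv.1)).map (fun s => pvSpecOf s.2)).any
          (pvTest (PySem.Str.lower kv.2)))) := by
  apply Bool.coe_iff_coe.mp
  simp only [List.any_eq_true, List.mem_map, List.mem_filter]
  constructor
  · rintro ⟨s, hs, hmatch⟩
    cases hget : PySem.Dict.get? (PySem.Dict.mk node) s.1 with
    | none => rw [hget] at hmatch; simp at hmatch
    | some nv0 =>
      rw [hget] at hmatch
      have hmem : (s.1, nv0) ∈ node := by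
        have := PySem.Dict.mem_items_of_get?_eq_some (d := PySem.Dict.mk node) hget
        simpa [PySem.Dict.items] using this
      refine ⟨(s.1, nv0), hmem, ?_⟩
      refine ⟨pvSpecOf s.2, ⟨s, ⟨hs, by simp⟩, rfl⟩, ?_⟩
      exact hmatch
  · rintro ⟨kv, hkv, _, ⟨s, ⟨hs, hkey⟩, rfl⟩, hmatch⟩
    refine ⟨s, hs, ?_⟩
    have hk : s.1 = kv.1 := by simpa using hkey
    have hget : PySem.Dict.get? (PySem.Dict.mk node) kv.1 = some kv.2 := by
      apply (PySem.Dict.get?_eq_some_iff_mem_items (d := PySem.Dict.mk node) (k := kv.1) kv.2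
        (by simpa [PySem.Dict.keys] using h)).mpr
      simpa [PySem.Dict.items] using hkv
    rw [hk, hget]
    exact hmatch

-- the per-node boolean: A's double scan equals B's keep-test
theorem pv_node_eq (node : List (String × String)) (ics : List (List (String × String)))
    (h : (node.map Prod.fst).Nodup) :
    (ics.any (fun condition => pvAMatchesCondition node condition))
      = !(pvKeep (pvByKey ics) node) := by
  unfold pvKeep pvAMatchesCondition
  rw [Bool.not_not]
  have hflat : (ics.any fun c => c.any fun kv => pvAMatchItem node kv.1 kv.2)
      = ((ics.flatMap id).any fun kv => pvAMatchItem node kv.1 kv.2) := by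
    simp only [List.any_flatMap, id_eq]
  rw [hflat]
  simp only [pv_item_eq]
  rw [pv_exchange node (ics.flatMap id) h]
  refine PySem.List.any_congr_mem (fun kv _ => ?_)
  rw [← pv_byKey_getD, PySem.Dict.getD_eq_get?_getD]
  cases PySem.Dict.get? (pvByKey ics) kv.1 <;> simp

-- ===== VERDICT (by name: the statement is the Claim_ definition above) =====
theorem filter_nodes_spec : Claim_equal_filter_nodes := by
  intro nodes ics _ hpre
  unfold Spec_filter_nodes filter_nodes filter_nodes_alt
  refine List.filter_congr (fun node hnode => ?_)
  rw [pv_node_eq node ics (hpre node hnode), Bool.not_not]
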